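-- pv_equiv track=rewrite | github.com/martin2097/personal_web | pages/group-creator.py | next_group
-- ===== SOURCE A (Python) =====
-- def next_group(previous_ele, len_rema, max_len):
--     output = []
--     if len_rema == 0:
--         output.append(previous_ele)
--     for r in range(max_len, 0, -1):
--         if (previous_ele[-1] in range(r, 0, -1)) and (len_rema >= r):
--             output += next_group(previous_ele + [r], len_rema - r, max_len)
--     return output
-- ===== SOURCE B (Python) =====
-- def next_group(previous_ele, len_rema, max_len):
--     # Compute suffix extensions depending only on (last element, remaining length),
--     # then attach the prefix once at the end.
--     def tails(last, rema):
--         out = [[]] if rema == 0 else []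
--         for r in range(max_len, 0, -1):
--             if 1 <= last <= r and rema >= r:
--                 out.extend([r] + t for t in tails(r, rema - r))
--         return out
--     return [previous_ele + t for t in tails(previous_ele[-1], len_rema)]
-- ===== Notes on version B (the rewrite author's own statement) =====
-- stated objective: alternative
-- what changed: A threads the growing prefix through every recursive call and concatenates recursive results; B computes the suffix extensions as a self-contained recursion on (last element, remaining sum) and attaches the prefix once with a single map at the end, so the prefix is never re-copied inside the recursion.
-- outside the precondition, e.g. on next_group([], 0, 0): A returns [[]], B raises IndexError
import Mathlib
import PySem

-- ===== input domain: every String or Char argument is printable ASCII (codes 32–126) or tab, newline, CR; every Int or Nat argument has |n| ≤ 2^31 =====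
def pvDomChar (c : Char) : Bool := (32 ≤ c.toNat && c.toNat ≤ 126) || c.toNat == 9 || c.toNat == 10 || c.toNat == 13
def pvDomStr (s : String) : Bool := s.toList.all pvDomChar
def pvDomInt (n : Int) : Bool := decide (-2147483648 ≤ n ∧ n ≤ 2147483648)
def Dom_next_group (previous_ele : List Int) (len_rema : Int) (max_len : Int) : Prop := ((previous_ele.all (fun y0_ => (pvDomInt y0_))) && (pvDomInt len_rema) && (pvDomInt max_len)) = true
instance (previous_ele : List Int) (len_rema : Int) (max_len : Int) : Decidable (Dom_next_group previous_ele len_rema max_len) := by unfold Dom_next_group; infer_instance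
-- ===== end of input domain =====

-- B computes suffix extensions from (last element, remaining sum) alone and attaches the
-- prefix once with a single map; A threads the growing prefix through every recursive call.

-- ===== PORT A =====
-- A's loop `for r in range(max_len, 0, -1)` is a foldl over that range; the guard
-- `previous_ele[-1] in range(r, 0, -1)` is transliterated as 1 ≤ last ∧ last ≤ r
-- (exact: membership in range(r, 0, -1)); pyGet? none = Python's IndexError on
-- `previous_ele[-1]` when previous_ele = [] (outside Pre_).
def next_group (previous_ele : List Int) (len_rema : Int) (max_len : Int) : List (List Int) :=
  (PySem.List.pyRange max_len 0 (-1)).foldl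
    (fun output r =>
      match PySem.List.pyGet? previous_ele (-1) with
      | none => output
      | some last =>
        if _h : 1 ≤ last ∧ last ≤ r ∧ r ≤ len_rema then
          output ++ next_group (previous_ele ++ [r]) (len_rema - r) max_len
        else output)
    (if len_rema == 0 then [previous_ele] else [])
termination_by len_rema.toNat
decreasing_by omega

-- ===== PORT B =====
-- Source B's inner `tails(last, rema)`: its loop is a foldl over range(max_len, 0, -1)
-- starting from the base `[[]] if rema == 0 else []`; its guard `1 <= last <= r and
-- rema >= r` is the same conjunction.
def tailsB (max_len : Int) (last : Int) (rema : Int) : List (List Int) :=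
  (PySem.List.pyRange max_len 0 (-1)).foldl
    (fun out r =>
      if _h : 1 ≤ last ∧ last ≤ r ∧ r ≤ rema then
        out ++ (tailsB max_len r (rema - r)).map (fun t => r :: t)
      else out)
    (if rema == 0 then [([] : List Int)] else [])
termination_by rema.toNat
decreasing_by omega

-- `previous_ele[-1]` raises IndexError in Python when previous_ele = [] (outside Pre_).
def next_group_alt (previous_ele : List Int) (len_rema : Int) (max_len : Int) : List (List Int) :=
  match PySem.List.pyGet? previous_ele (-1) with
  | none => []
  | some last =>
    (tailsB max_len last len_rema).map (fun t => previous_ele ++ t)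

-- ===== PRECONDITION & SPEC =====
-- Pre_ excludes previous_ele = [] : B always evaluates previous_ele[-1] and raises
-- IndexError there, while A raises too unless max_len ≤ 0 (where A still returns).
def Pre_next_group (previous_ele : List Int) (len_rema : Int) (max_len : Int) : Prop :=
  previous_ele ≠ []
instance (previous_ele : List Int) (len_rema : Int) (max_len : Int) : Decidable (Pre_next_group previous_ele len_rema max_len) := by unfold Pre_next_group; infer_instance

def pvWitness_next_group : List Int × Int × Int := ([2], 3, 3)

def Spec_next_group (previous_ele : List Int) (len_rema : Int) (max_len : Int) (out : List (List Int)) : Prop := out = next_group_alt previous_ele len_rema max_len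
instance (previous_ele : List Int) (len_rema : Int) (max_len : Int) (out : List (List Int)) : Decidable (Spec_next_group previous_ele len_rema max_len out) := by unfold Spec_next_group; infer_instance

-- ===== CLAIM (what is proved, stated in full; the proofs are below) =====
def Claim_equal_next_group : Prop := ∀ (previous_ele : List Int) (len_rema : Int) (max_len : Int), Dom_next_group previous_ele len_rema max_len → Pre_next_group previous_ele len_rema max_len → Spec_next_group previous_ele len_rema max_len (next_group previous_ele len_rema max_len)

-- ===== LEMMAS AND PROOFS =====

lemma fold_aux (prev : List Int) (ln ml last : Int)
    (hget : PySem.List.pyGet? prev (-1) = some last)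
    (H : ∀ r : Int, 1 ≤ last → last ≤ r → r ≤ ln →
      next_group (prev ++ [r]) (ln - r) ml = (tailsB ml r (ln - r)).map (fun t => prev ++ r :: t)) :
    ∀ (rs : List Int) (acc : List (List Int)),
      rs.foldl
        (fun output r =>
          match PySem.List.pyGet? prev (-1) with
          | none => output
          | some last =>
            if _h : 1 ≤ last ∧ last ≤ r ∧ r ≤ ln then
              output ++ next_group (prev ++ [r]) (ln - r) ml
            else output)
        (acc.map (fun t => prev ++ t))
      = (rs.foldl
          (fun out r =>
            if _h : 1 ≤ last ∧ last ≤ r ∧ r ≤ ln then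
              out ++ (tailsB ml r (ln - r)).map (fun t => r :: t)
            else out)
          acc).map (fun t => prev ++ t) := by
  intro rs acc
  have hfun : (fun (output : List (List Int)) (r : Int) =>
      match PySem.List.pyGet? prev (-1) with
      | none => output
      | some last =>
        if _h : 1 ≤ last ∧ last ≤ r ∧ r ≤ ln then
          output ++ next_group (prev ++ [r]) (ln - r) ml
        else output)
      = (fun (output : List (List Int)) (r : Int) =>
        if _h : 1 ≤ last ∧ last ≤ r ∧ r ≤ ln then
          output ++ next_group (prev ++ [r]) (ln - r) ml
        else output) := by
    funext output r; rw [hget]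
  rw [hfun]
  induction rs generalizing acc with
  | nil => rfl
  | cons r rest ih =>
    simp only [List.foldl_cons]
    by_cases hguard : 1 ≤ last ∧ last ≤ r ∧ r ≤ ln
    · rw [dif_pos hguard, dif_pos hguard, H r hguard.1 hguard.2.1 hguard.2.2]
      rw [show (acc.map (fun t => prev ++ t)) ++ (tailsB ml r (ln - r)).map (fun t => prev ++ r :: t)
            = ((acc ++ (tailsB ml r (ln - r)).map (fun t => r :: t)).map (fun t => prev ++ t)) by
          simp [Function.comp]]
      exact ih _
    · rw [dif_neg hguard, dif_neg hguard]
      exact ih acc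

lemma ng_eq_map_tailsB (n : Nat) :
    ∀ (prev : List Int) (ln ml last : Int), ln ≤ (n : Int) →
      PySem.List.pyGet? prev (-1) = some last →
      next_group prev ln ml = (tailsB ml last ln).map (fun t => prev ++ t) := by
  induction n with
  | zero =>
    intro prev ln ml last hln hget
    have H : ∀ r : Int, 1 ≤ last → last ≤ r → r ≤ ln →
        next_group (prev ++ [r]) (ln - r) ml = (tailsB ml r (ln - r)).map (fun t => prev ++ r :: t) := by
      intro r h1 h2 h3
      exact absurd h3 (by push_cast at hln; omega)
    rw [next_group.eq_def, tailsB.eq_def]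
    rw [show (if (ln == 0) = true then [prev] else [])
          = (if (ln == 0) = true then [([] : List Int)] else []).map (fun t => prev ++ t) by
        split <;> simp]
    exact fold_aux prev ln ml last hget H _ _
  | succ n ihn =>
    intro prev ln ml last hln hget
    have H : ∀ r : Int, 1 ≤ last → last ≤ r → r ≤ ln →
        next_group (prev ++ [r]) (ln - r) ml = (tailsB ml r (ln - r)).map (fun t => prev ++ r :: t) := by
      intro r h1 h2 h3
      rw [ihn (prev ++ [r]) (ln - r) ml r (by push_cast at hln ⊢; omega)
        (PySem.List.pyGet?_neg_one_append_singleton prev r)]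
      simp
    rw [next_group.eq_def, tailsB.eq_def]
    rw [show (if (ln == 0) = true then [prev] else [])
          = (if (ln == 0) = true then [([] : List Int)] else []).map (fun t => prev ++ t) by
        split <;> simp]
    exact fold_aux prev ln ml last hget H _ _

-- ===== VERDICT (by name: the statement is the Claim_ definition above) =====
theorem next_group_spec : Claim_equal_next_group := by
  intro prev ln ml hdom hpre
  unfold Spec_next_group next_group_alt
  obtain ⟨last, hget⟩ : ∃ last, PySem.List.pyGet? prev (-1) = some last := by
    rw [PySem.List.pyGet?_neg_one]
    exact ⟨prev.getLast hpre, List.getLast?_eq_some_getLast hpre⟩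
  rw [hget]
  exact ng_eq_map_tailsB ln.toNat prev ln ml last (by omega) hget
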